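-- pv_equiv track=rewrite | github.com/ThomasEcalle/cryptographie | correction.py | paquet
-- ===== SOURCE A (Python) =====
-- def codex(c):
--     try:
--         c = str(c)
--         c = c[0].upper()
--     except:
--         return -1
--     n = ord(c) - ord('A')
--     if (n > 25 or n < 0): return -1
--     return n
--
-- def paquet(txt, paq=1):
--     try:
--         txt = str(txt)
--         paq = int(paq)
--     except:
--         return dict()
--     if (paq < 0): return dict()
--
--     res = dict()
--     n = len(txt)
--     i = 0
--     nb_paq = -1
--     while (i < n):
--         if (i % paq == 0):
--             nb_paq += 1
--             res[nb_paq] = 0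
--         res[nb_paq] = res[nb_paq] * 100 + codex(txt[i])
--         i += 1
--
--     while (i % paq != 0):
--         res[nb_paq] *= 100
--         i += 1
--     return res
-- ===== SOURCE B (Python) =====
-- def _code(ch):
--     u = ch.upper()
--     n = ord(u) - ord('A')
--     return n if 0 <= n <= 25 else -1
--
-- def paquet(txt, paq=1):
--     try:
--         txt = str(txt)
--         paq = int(paq)
--     except:
--         return dict()
--     if paq < 0:
--         return dict()
--     # (len + paq - 1) // paq raises ZeroDivisionError when paq == 0, like A's i % paq
--     nb = (len(txt) + paq - 1) // paq
--     res = dict()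
--     for k in range(nb):
--         chunk = txt[k * paq:(k + 1) * paq]
--         v = 0
--         for ch in chunk:
--             v = v * 100 + _code(ch)
--         res[k] = v * 100 ** (paq - len(chunk))
--     return res
-- ===== Notes on version B (the rewrite author's own statement) =====
-- stated objective: simpler
-- what changed: A's two index-driven while-loops (per-character modulo test deciding when to open a packet, plus a trailing while that multiplies the last packet) are replaced by computing the packet count nb = (len+paq-1)//paq and doing one slice-fold-pad insert per packet.
import Mathlib
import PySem

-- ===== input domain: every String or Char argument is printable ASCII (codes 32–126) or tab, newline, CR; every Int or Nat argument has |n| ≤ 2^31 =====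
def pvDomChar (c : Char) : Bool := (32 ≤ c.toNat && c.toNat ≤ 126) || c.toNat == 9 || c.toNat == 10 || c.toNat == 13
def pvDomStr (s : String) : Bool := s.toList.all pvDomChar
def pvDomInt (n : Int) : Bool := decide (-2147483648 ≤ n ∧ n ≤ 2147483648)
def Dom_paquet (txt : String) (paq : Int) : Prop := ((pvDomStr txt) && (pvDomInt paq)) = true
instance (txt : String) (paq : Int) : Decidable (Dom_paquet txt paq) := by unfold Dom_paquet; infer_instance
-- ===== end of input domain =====

-- B re-implements A by one insert per precomputed chunk (slice + fold per packet) instead of A's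
-- per-index while-loops with modulo tests and dict rewrites; objective: simpler decomposition.

-- ===== PORT A =====
-- codex: in paquet it is only ever applied to a single character, so str(c) and c[0] are identities
-- and the except branch is unreachable; .upper() on one printable-ASCII char is upperChar (exact there).
def codex (c : Char) : Int :=
  let u := PySem.Chars.upperChar c
  let n : Int := (u.toNat : Int) - 65   -- ord(c) - ord('A')
  if n > 25 ∨ n < 0 then -1 else n

-- the body of A's first while loop (state: (res, nb_paq), index i; txt[i] with 0 ≤ i < len)
def pvStepA (paq : Int) (cs : List Char) (st : PySem.Dict Int Int × Int) (i : Nat) :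
    PySem.Dict Int Int × Int :=
  let st' := if PySem.Int.mod (i : Int) paq = 0 then (st.1.insert (st.2 + 1) 0, st.2 + 1) else st
  (st'.1.insert st'.2 (st'.1.getD st'.2 0 * 100 + codex (PySem.List.pyGetD cs (i : Int) ' ')), st'.2)

-- try: str(txt)/int(paq) are identities on a String/Int argument, the except branch is unreachable.
def paquet (txt : String) (paq : Int) : List (Int × Int) :=
  if paq < 0 then [] else
    let cs := txt.toList
    let n := cs.length
    let st := (List.range n).foldl (pvStepA paq cs) (PySem.Dict.empty, -1)
    -- second while: for paq > 0 it runs exactly ((-n) mod paq) iterations (the only case that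
    -- reaches it: paq < 0 returned above, and paq = 0 — where Python raises — is outside Pre_);
    -- res[nb_paq] *= 100 on the existing key nb_paq is modify with any default
    let res := (List.range (PySem.Int.mod (-(n : Int)) paq).toNat).foldl
        (fun res _ => res.modify st.2 0 (· * 100)) st.1
    res.items

-- ===== PORT B =====
-- _code from Source B (single printable-ASCII char: .upper() is upperChar, exact there)
def pvCode (ch : Char) : Int :=
  let n : Int := ((PySem.Chars.upperChar ch).toNat : Int) - 65
  if 0 ≤ n ∧ n ≤ 25 then n else -1

-- the body of Source B's for-loop: chunk = txt[k*paq:(k+1)*paq]; fold its chars; pad; res[k] = v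
def pvStepB (paq : Int) (cs : List Char) (res : PySem.Dict Int Int) (k : Nat) :
    PySem.Dict Int Int :=
  let chunk := PySem.List.slice cs (some ((k : Int) * paq)) (some (((k : Int) + 1) * paq))
  let v := chunk.foldl (fun v ch => v * 100 + pvCode ch) 0
  res.insert (k : Int) (v * 100 ^ ((paq - (chunk.length : Int)).toNat))

-- try/str/int as in A; nb = (len(txt) + paq - 1) // paq, then one insert per chunk
def paquet_alt (txt : String) (paq : Int) : List (Int × Int) :=
  if paq < 0 then [] else
    let cs := txt.toList
    let nb := PySem.Int.floordiv ((cs.length : Int) + paq - 1) paq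
    ((List.range nb.toNat).foldl (pvStepB paq cs) PySem.Dict.empty).items

-- ===== PRECONDITION & SPEC =====
-- Pre_ excludes exactly paq = 0, where Python A raises ZeroDivisionError (i % 0; B divides by 0 too).
def Pre_paquet (txt : String) (paq : Int) : Prop := paq ≠ 0
instance (txt : String) (paq : Int) : Decidable (Pre_paquet txt paq) := by
  unfold Pre_paquet; infer_instance

def pvWitness_paquet : String × Int := ("HELLO", 2)

def Spec_paquet (txt : String) (paq : Int) (out : List (Int × Int)) : Prop := out = paquet_alt txt paq
instance (txt : String) (paq : Int) (out : List (Int × Int)) : Decidable (Spec_paquet txt paq out) := by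
  unfold Spec_paquet; infer_instance

-- ===== CLAIM (what is proved, stated in full; the proofs are below) =====
def Claim_equal_paquet : Prop := ∀ (txt : String) (paq : Int),
  Dom_paquet txt paq → Pre_paquet txt paq → Spec_paquet txt paq (paquet txt paq)

-- ===== LEMMAS AND PROOFS =====

-- the two character codes agree
theorem codex_eq_pvCode (c : Char) : codex c = pvCode c := by
  simp only [codex, pvCode]; split_ifs <;> omega

-- B's per-chunk value: fold of the chunk's characters, then trailing padding
def pvEnc (l : List Char) : Int := l.foldl (fun v ch => v * 100 + pvCode ch) 0

def pvValB (paq : Int) (cs : List Char) (k : Nat) : Int :=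
  let chunk := PySem.List.slice cs (some ((k : Int) * paq)) (some (((k : Int) + 1) * paq))
  pvEnc chunk * 100 ^ ((paq - (chunk.length : Int)).toNat)

theorem pvEnc_append (l : List Char) (c : Char) :
    pvEnc (l ++ [c]) = pvEnc l * 100 + pvCode c := by
  simp [pvEnc]

-- inserting a key absent from the dict appends the pair
theorem dict_insert_fresh (d : PySem.Dict Int Int) (k : Int) (v : Int)
    (h : ∀ q ∈ d.items, q.1 ≠ k) : (d.insert k v).items = d.items ++ [(k, v)] := by
  have hc : d.contains k = false := by
    simp [PySem.Dict.contains, List.any_eq_false]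
    intro a b hab
    exact h (a, b) hab
  simp [PySem.Dict.insert, hc]

-- B's loop inserts the fresh keys 0,…,m-1 in order
theorem b_fold_items (paq : Int) (cs : List Char) (m : Nat) :
    ((List.range m).foldl (pvStepB paq cs) PySem.Dict.empty).items
      = (List.range m).map (fun (k : Nat) => ((k : Int), pvValB paq cs k)) := by
  induction m with
  | zero => simp [PySem.Dict.empty]
  | succ m ih =>
    rw [List.range_succ, List.foldl_append, List.map_append]
    simp only [List.foldl_cons, List.foldl_nil, List.map_cons, List.map_nil]
    show (PySem.Dict.insert _ _ _).items = _
    rw [dict_insert_fresh _ _ _ (by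
      rw [ih]; intro q hq; simp at hq; obtain ⟨k, hk, rfl⟩ := hq; simp; omega), ih]
    rfl

-- A's first loop across one chunk: starting at boundary index j*P with state (d, j-1),
-- processing t characters (1 ≤ t ≤ P, all indices < |cs|) yields d.insert j (pvEnc prefix).
theorem a_chunk (P : Nat) (hP : 0 < P) (cs : List Char) (j t : Nat) (ht : 1 ≤ t) (htP : t ≤ P)
    (hn : j * P + t ≤ cs.length) (d : PySem.Dict Int Int) :
    ((List.range t).map (fun u => j * P + u)).foldl (pvStepA (P : Int) cs) (d, (j : Int) - 1)
      = (d.insert (j : Int) (pvEnc ((cs.drop (j * P)).take t)), (j : Int)) := by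
  induction t, ht using Nat.le_induction with
  | base =>
    have hlt : j * P < cs.length := by omega
    have hmod : PySem.Int.mod ((j * P + 0 : Nat) : Int) (P : Int) = 0 := by
      rw [PySem.Int.mod_natCast]; simp
    have hget : PySem.List.pyGetD cs ((j * P + 0 : Nat) : Int) ' ' = cs[j * P] := by
      rw [PySem.List.pyGetD_natCast]; simp [List.getElem?_eq_getElem hlt]
    have htake : (cs.drop (j * P)).take 1 = [cs[j * P]] := by
      rw [List.take_one, List.head?_drop]
      simp [List.getElem?_eq_getElem hlt]
    simp only [List.range_one, List.map_cons, List.map_nil, List.foldl_cons, List.foldl_nil,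
      pvStepA, hmod, if_pos, hget, htake]
    simp [PySem.Dict.getD_insert_self, PySem.Dict.insert_insert_self, codex_eq_pvCode, pvEnc]
  | succ t ht ih =>
    have hlt : j * P + t < cs.length := by omega
    have hmod : ¬ PySem.Int.mod ((j * P + t : Nat) : Int) (P : Int) = 0 := by
      rw [PySem.Int.mod_natCast, Nat.add_comm, Nat.add_mul_mod_self_right,
        Nat.mod_eq_of_lt (by omega)]
      simp; omega
    have hget : PySem.List.pyGetD cs ((j * P + t : Nat) : Int) ' ' = cs[j * P + t] := by
      rw [PySem.List.pyGetD_natCast]; simp [List.getElem?_eq_getElem hlt]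
    have htake : (cs.drop (j * P)).take (t + 1)
        = (cs.drop (j * P)).take t ++ [cs[j * P + t]] := by
      rw [List.take_add_one, List.getElem?_drop]
      simp [List.getElem?_eq_getElem hlt]
    rw [List.range_succ, List.map_append, List.foldl_append, ih (by omega) (by omega)]
    simp only [List.map_cons, List.map_nil, List.foldl_cons, List.foldl_nil, pvStepA, hmod,
      hget, htake]
    simp [PySem.Dict.getD_insert_self, PySem.Dict.insert_insert_self, pvEnc_append,
      codex_eq_pvCode]

-- A's first loop over all full chunks
theorem a_full (P : Nat) (hP : 0 < P) (cs : List Char) (j : Nat) (hj : j * P ≤ cs.length) :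
    (List.range (j * P)).foldl (pvStepA (P : Int) cs) (PySem.Dict.empty, -1)
      = (PySem.Dict.mk ((List.range j).map
          (fun (k : Nat) => ((k : Int), pvEnc ((cs.drop (k * P)).take P)))), (j : Int) - 1) := by
  induction j with
  | zero => simp [PySem.Dict.empty]
  | succ j ih =>
    have hj' : j * P ≤ cs.length := by nlinarith
    rw [show (j + 1) * P = j * P + P by ring, List.range_add, List.foldl_append, ih hj']
    rw [a_chunk P hP cs j P hP le_rfl (by rw [← Nat.succ_mul]; exact hj) _]
    apply Prod.ext
    · apply PySem.Dict.ext
      rw [dict_insert_fresh _ _ _ (by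
        intro q hq; simp at hq; obtain ⟨k, hk, rfl, -⟩ := hq; simp; omega)]
      rw [List.range_succ, List.map_append]
      simp
    · simp

-- A's padding loop multiplies the last packet by 100^m
theorem a_pad (d : PySem.Dict Int Int) (k v : Int) (m : Nat) :
    (List.range m).foldl (fun res _ => PySem.Dict.modify res k 0 (· * 100)) (d.insert k v)
      = d.insert k (v * 100 ^ m) := by
  induction m with
  | zero => simp
  | succ m ih =>
    rw [List.range_succ, List.foldl_append, ih]
    simp [PySem.Dict.modify, PySem.Dict.getD_insert_self, PySem.Dict.insert_insert_self, pow_succ,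
      mul_assoc]

theorem slice_chunk (P : Nat) (cs : List Char) (k : Nat) :
    PySem.List.slice cs (some ((k : Int) * (P : Int))) (some (((k : Int) + 1) * (P : Int)))
      = (cs.drop (k * P)).take P := by
  rw [show ((k : Int) * (P : Int)) = ((k * P : Nat) : Int) by push_cast; ring,
    show (((k : Int) + 1) * (P : Int)) = ((k * P : Nat) : Int) + ((P : Nat) : Int) by
      push_cast; ring,
    PySem.List.slice_natCast_add]

-- B's value for a FULL chunk ((k+1)*P ≤ |cs|) is the unpadded fold
theorem valB_full (P : Nat) (hP : 0 < P) (cs : List Char) (k : Nat)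
    (hk : (k + 1) * P ≤ cs.length) :
    pvValB (P : Int) cs k = pvEnc ((cs.drop (k * P)).take P) := by
  have hlen : ((cs.drop (k * P)).take P).length = P := by
    simp only [List.length_take, List.length_drop]
    have : k * P + P ≤ cs.length := by rw [← Nat.succ_mul]; exact hk
    omega
  simp only [pvValB, slice_chunk, hlen]
  simp

theorem paquet_eq_alt (txt : String) (paq : Int) (hpre : paq ≠ 0) :
    paquet txt paq = paquet_alt txt paq := by
  by_cases hneg : paq < 0
  · simp [paquet, paquet_alt, hneg]
  · obtain ⟨P, rfl⟩ : ∃ P : Nat, paq = (P : Int) := ⟨paq.toNat, by omega⟩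
    have hP : 0 < P := by omega
    simp only [paquet, paquet_alt, if_neg (show ¬ ((P : Nat) : Int) < 0 by omega)]
    set cs := txt.toList with hcs
    have hnd : cs.length / P * P + cs.length % P = cs.length := by
      rw [Nat.mul_comm]; exact Nat.div_add_mod _ _
    set n := cs.length with hn
    set jf := n / P with hjf
    set r := n % P with hrdef
    have hr : r < P := Nat.mod_lt _ hP
    have hmulc : P * jf = jf * P := by ring
    rcases Nat.eq_zero_or_pos r with hr0 | hr1
    · -- no partial chunk
      have hsplit : n = jf * P := by omega
      rw [hsplit, a_full P hP cs jf (le_of_eq hsplit.symm)]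
      have hpad : (PySem.Int.mod (-((jf * P : Nat) : Int)) ((P : Nat) : Int)).toNat = 0 := by
        rw [(PySem.Int.mod_eq_zero_iff_dvd _ _).mpr ⟨-(jf : Int), by push_cast; ring⟩]
        rfl
      have hnb : (PySem.Int.floordiv (((jf * P : Nat) : Int) + ((P : Nat) : Int) - 1)
          ((P : Nat) : Int)).toNat = jf := by
        rw [show ((jf * P : Nat) : Int) + ((P : Nat) : Int) - 1
            = ((jf * P + P - 1 : Nat) : Int) by omega, PySem.Int.floordiv_natCast,
          Int.toNat_natCast, show jf * P + P - 1 = P * jf + (P - 1) by omega,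
          Nat.mul_add_div hP, Nat.div_eq_of_lt (by omega), Nat.add_zero]
      rw [hpad, hnb, b_fold_items]
      simp only [List.range_zero, List.foldl_nil]
      apply List.map_congr_left
      intro k hk
      rw [List.mem_range] at hk
      rw [valB_full P hP cs k (by
        calc (k + 1) * P ≤ jf * P := Nat.mul_le_mul_right _ (by omega)
        _ = n := hsplit.symm)]
    · -- partial last chunk of r characters
      obtain ⟨Df, hDf⟩ : ∃ Df, Df = PySem.Dict.mk ((List.range jf).map
          (fun (k : Nat) => ((k : Int), pvEnc ((cs.drop (k * P)).take P)))) := ⟨_, rfl⟩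
      have hjk : jf * P ≤ n := by omega
      rw [show n = jf * P + r by omega, List.range_add, List.foldl_append,
        a_full P hP cs jf hjk,
        a_chunk P hP cs jf r hr1 (le_of_lt hr) (by omega) _, ← hDf]
      have hpad : (PySem.Int.mod (-((jf * P + r : Nat) : Int)) ((P : Nat) : Int)).toNat
          = P - r := by
        rw [PySem.Int.mod_eq_emod_of_pos (by omega),
          show (-((jf * P + r : Nat) : Int)) = ((P - r : Nat) : Int) + (-(jf : Int) - 1) * ((P : Nat) : Int) by
            push_cast [Nat.cast_sub (le_of_lt hr)]; ring,
          Int.add_mul_emod_self_right, Int.emod_eq_of_lt (by omega) (by omega),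
          Int.toNat_natCast]
      have hnb : (PySem.Int.floordiv (((jf * P + r : Nat) : Int) + ((P : Nat) : Int) - 1)
          ((P : Nat) : Int)).toNat = jf + 1 := by
        rw [show ((jf * P + r : Nat) : Int) + ((P : Nat) : Int) - 1
            = ((jf * P + r + P - 1 : Nat) : Int) by omega, PySem.Int.floordiv_natCast,
          Int.toNat_natCast, show jf * P + r + P - 1 = P * (jf + 1) + (r - 1) by
            have : P * (jf + 1) = jf * P + P := by ring
            omega,
          Nat.mul_add_div hP, Nat.div_eq_of_lt (by omega), Nat.add_zero]
      rw [hpad, hnb, b_fold_items]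
      simp only []
      rw [a_pad, dict_insert_fresh _ _ _ (by
        rw [hDf]; intro q hq; simp at hq; obtain ⟨k, hk, rfl, -⟩ := hq; simp; omega)]
      rw [List.range_succ, List.map_append, hDf]
      congr 1
      · apply List.map_congr_left
        intro k hk
        rw [List.mem_range] at hk
        rw [valB_full P hP cs k (by
          calc (k + 1) * P ≤ jf * P := Nat.mul_le_mul_right _ (by omega)
          _ ≤ n := hjk)]
      · -- the padded last packet
        have hdrop : (cs.drop (jf * P)).length = r := by
          rw [List.length_drop]; omega
        have htail : ∀ m : Nat, r ≤ m → (cs.drop (jf * P)).take m = cs.drop (jf * P) := by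
          intro m hm; exact List.take_of_length_le (by omega)
        simp only [List.map_cons, List.map_nil, pvValB, slice_chunk, htail P (le_of_lt hr),
          htail r le_rfl, hdrop]
        rw [show (((P : Nat) : Int) - ((r : Nat) : Int)).toNat = P - r by omega]

-- ===== VERDICT (by name: the statement is the Claim_ definition above) =====
theorem paquet_spec : Claim_equal_paquet := by
  intro txt paq _ hpre
  exact paquet_eq_alt txt paq hpre
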